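-- pv_equiv track=rewrite | github.com/sky-butterfly/coding-test | 프로그래머스/Level_0/l로 만들기.py | solution
-- ===== SOURCE A (Python) =====
-- def solution(myString):
--     answer = ''
--
--     for m in myString:
--         if ord(m) < ord('l'):
--             answer += 'l'
--             continue
--         answer += m
--
--     return answer
-- ===== SOURCE B (Python) =====
-- def solution(myString):
--     for ch in sorted(set(myString)):
--         if ch < 'l':
--             myString = myString.replace(ch, 'l')
--     return myString
-- ===== Notes on version B (the rewrite author's own statement) =====
-- stated objective: alternative
-- what changed: B iterates over the sorted set of distinct characters and performs one global str.replace pass per character below the threshold (the passes commute since the replacement character is never itself below the threshold), instead of A's single per-character loop that tests each ordinal and concatenates onto an accumulator string.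
import Mathlib
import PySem

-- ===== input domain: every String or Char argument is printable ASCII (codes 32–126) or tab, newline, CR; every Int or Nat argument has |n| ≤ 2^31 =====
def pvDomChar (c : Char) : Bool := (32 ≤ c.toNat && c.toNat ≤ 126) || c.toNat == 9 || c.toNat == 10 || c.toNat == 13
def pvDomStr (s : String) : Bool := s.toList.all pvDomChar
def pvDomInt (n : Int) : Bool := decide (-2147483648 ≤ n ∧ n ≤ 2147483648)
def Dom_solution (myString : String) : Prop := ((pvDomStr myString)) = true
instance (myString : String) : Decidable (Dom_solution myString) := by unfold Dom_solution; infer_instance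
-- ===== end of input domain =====

-- B replaces A's single per-character accumulator loop by staged global replace
-- passes, one per distinct character below 'l' (alternative algorithm, same result).


-- ===== PORT A =====
-- for m in myString: if ord(m) < ord('l'): answer += 'l' else answer += m
def solution (myString : String) : String :=
  String.ofList (myString.toList.foldl
    (fun answer m => if (m.toNat : Int) < (108 : Int) then answer ++ ['l'] else answer ++ [m]) [])

-- ===== PORT B =====
-- for ch in sorted(set(myString)): if ch < 'l': myString = myString.replace(ch, 'l')
def solution_alt (myString : String) : String :=
  (PySem.List.sorted (PySem.Set.ofList myString.toList) (fun c => c) false).foldl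
    (fun s ch => if ch < 'l' then PySem.Str.replace s (String.ofList [ch]) "l" else s) myString

-- ===== PRECONDITION & SPEC =====
def Spec_solution (myString : String) (out : String) : Prop := out = solution_alt myString
instance (myString : String) (out : String) : Decidable (Spec_solution myString out) := by unfold Spec_solution; infer_instance

-- ===== CLAIM =====
def Claim_equal_solution : Prop := ∀ (myString : String), Dom_solution myString → Spec_solution myString (solution myString)

-- ===== LEMMAS AND PROOFS =====

-- the fuel-indexed scanner of Chars.replace, on a single-character pattern, is a pointwise map
theorem pv_replace_go_single (a b : Char) (fuel : Nat) (l acc : List Char)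
    (h : l.length ≤ fuel) :
    PySem.Chars.replace.go [a] [b] fuel l acc
      = acc.reverse ++ l.map (fun c => if c = a then b else c) := by
  induction fuel generalizing l acc with
  | zero =>
    have : l = [] := List.length_eq_zero_iff.mp (Nat.le_zero.mp h)
    subst this; simp [PySem.Chars.replace.go]
  | succ n ih =>
    cases l with
    | nil => simp [PySem.Chars.replace.go]
    | cons c t =>
      by_cases hc : c = a
      · subst hc
        rw [PySem.Chars.replace.go]
        simp only [show List.isPrefixOf [c] (c :: t) = true by simp [List.isPrefixOf], if_true]
        rw [ih _ _ (by simpa using Nat.le_of_succ_le_succ h)]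
        simp
      · rw [PySem.Chars.replace.go]
        simp only [show List.isPrefixOf [a] (c :: t) = false by
          simp [List.isPrefixOf]; exact fun hh => (hc hh.symm).elim, if_false, Bool.false_eq_true]
        rw [ih _ _ (by simpa using Nat.le_of_succ_le_succ h)]
        simp [hc]

-- s.replace(a, b) with single-character a, b substitutes pointwise
theorem pv_replace_single (s : String) (a b : Char) :
    (PySem.Str.replace s (String.ofList [a]) (String.ofList [b])).toList
      = s.toList.map (fun c => if c = a then b else c) := by
  rw [PySem.Str.toList_replace]
  unfold PySem.Chars.replace
  simp only [String.toList_ofList, List.isEmpty_cons, Bool.false_eq_true, if_false]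
  rw [pv_replace_go_single _ _ _ _ _ (le_refl _)]
  simp

-- the staged replace passes compute a single pointwise map over the original string
theorem pv_foldl_replace (cs : List Char) (s : String) :
    (cs.foldl (fun s ch => if ch < 'l' then PySem.Str.replace s (String.ofList [ch]) "l" else s) s).toList
      = s.toList.map (fun c => if c ∈ cs ∧ c < 'l' then 'l' else c) := by
  induction cs generalizing s with
  | nil => simp
  | cons x xs ih =>
    simp only [List.foldl_cons]
    by_cases hx : x < 'l'
    · rw [if_pos hx, ih]
      have : ("l" : String) = String.ofList ['l'] := rfl
      rw [this, pv_replace_single]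
      rw [List.map_map]
      apply List.map_congr_left
      intro c _
      simp only [Function.comp]
      by_cases hca : c = x
      · subst hca; simp [hx]
      · simp only [List.mem_cons, if_neg hca]
        by_cases hl : c ∈ xs ∧ c < 'l'
        · simp [hl, hca]
        · have : ¬((c = x ∨ c ∈ xs) ∧ c < 'l') := by
            rintro ⟨h1 | h1, h2⟩; exact hca h1; exact hl ⟨h1, h2⟩
          simp [hl, this]
    · rw [if_neg hx, ih]
      apply List.map_congr_left
      intro c _
      simp only [List.mem_cons]
      by_cases hca : c = x
      · subst hca; simp [hx]
      · simp [hca]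

-- A's loop body pushes one character per step
theorem pv_solution_eq_map (myString : String) :
    solution myString
      = String.ofList (myString.toList.map
          (fun m => if (m.toNat : Int) < (108 : Int) then 'l' else m)) := by
  unfold solution
  have h : (fun (answer : List Char) (m : Char) =>
      if (m.toNat : Int) < (108 : Int) then answer ++ ['l'] else answer ++ [m])
      = (fun answer m => answer ++ [if (m.toNat : Int) < (108 : Int) then 'l' else m]) := by
    funext answer m; split <;> rfl
  rw [h, PySem.List.foldl_append_singleton_eq_map]
  simp

-- ===== VERDICT =====
theorem solution_spec : Claim_equal_solution := by
  intro s _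
  unfold Spec_solution solution_alt
  have htl : (solution_alt s).toList = (solution s).toList := by
    show ((PySem.List.sorted (PySem.Set.ofList s.toList) (fun c => c) false).foldl
      (fun s ch => if ch < 'l' then PySem.Str.replace s (String.ofList [ch]) "l" else s) s).toList = _
    rw [pv_foldl_replace, pv_solution_eq_map]
    simp only [String.toList_ofList]
    apply List.map_congr_left
    intro c hc
    have hmem : c ∈ PySem.List.sorted (PySem.Set.ofList s.toList) (fun c => c) false := by
      rw [PySem.List.mem_sorted]
      exact (PySem.Set.mem_ofList _ _).mpr hc
    by_cases hl : c < 'l'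
    · have : (c.toNat : Int) < 108 := by
        have : c.toNat < 108 := hl
        omega
      simp [hmem, hl, this]
    · have : ¬((c.toNat : Int) < 108) := by
        intro h
        exact hl (show c.toNat < 108 by omega)
      simp [hl, this]
  have := congrArg String.ofList htl
  simpa using this.symm
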